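-- pv_equiv track=rewrite | github.com/georgievw/YandexCup2023 | Backend/B/B.py | make_haiku
-- ===== SOURCE A (Python) =====
-- def get_similarity(string, begin, word):
--   similarity_count = 0
--   for i in range(len(word)):
--     if string[begin+i] == word[i]:
--       similarity_count += 1
--   return similarity_count
--
-- def make_haiku(string, word1, word2):
--   word1_lst = list()
--   word2_lst = list()
--
--   for i in range(len(string)-len(word1)+1):
--     sim = get_similarity(string, i, word1)
--     if not word1_lst or word1_lst[-1][0] < sim:
--       word1_lst.append((sim, i))
--
--   for i in reversed(range(len(string)-len(word2)+1)):
--     sim = get_similarity(string, i, word2)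
--     if not word2_lst or word2_lst[-1][0] < sim:
--       word2_lst.append((sim, i))
--
--   word1_i = word2_i = 0
--   max_similarity = -1
--   for i in range(len(word1_lst)):
--     for j in range(len(word2_lst)):
--       if word2_lst[j][1] - len(word1) >= word1_lst[i][1] and word2_lst[j][0] + word1_lst[i][0] > max_similarity:
--         word1_i = word1_lst[i][1]
--         word2_i = word2_lst[j][1]
--         max_similarity = word2_lst[j][0] + word1_lst[i][0]
--   return string[:word1_i] + word1 + string[word1_i+len(word1):word2_i] + word2 + string[word2_i+len(word2):]
-- ===== SOURCE B (Python) =====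
-- def make_haiku(string, word1, word2):
--     n, m1, m2 = len(string), len(word1), len(word2)
--
--     def sims(word, m):
--         return [sum(1 for a, b in zip(string[i:i + m], word) if a == b)
--                 for i in range(n - m + 1)]
--
--     s1 = sims(word1, m1)
--     s2 = sims(word2, m2)
--
--     # strictly increasing prefix records of s1 (leftmost position per record value)
--     recs1, best = [], -1
--     for i, s in enumerate(s1):
--         if s > best:
--             recs1.append((s, i))
--             best = s
--
--     # strictly increasing suffix records of s2, scanned right-to-left
--     recs2, best = [], -1
--     for i in range(len(s2) - 1, -1, -1):
--         if s2[i] > best: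
--             recs2.append((s2[i], i))
--             best = s2[i]
--
--     rem = recs2[::-1]  # positions increasing, similarities decreasing
--     best_sum, p1, p2 = -1, 0, 0
--     for s, p in recs1:
--         thr = p + m1
--         while rem and rem[0][1] < thr:
--             rem = rem[1:]
--         if not rem:
--             break
--         if s + rem[0][0] > best_sum:
--             best_sum, p1, p2 = s + rem[0][0], p, rem[0][1]
--
--     return string[:p1] + word1 + string[p1 + m1:p2] + word2 + string[p2 + m2:]
-- ===== Notes on version B (the rewrite author's own statement) =====
-- stated objective: faster
-- what changed: B counts position matches by zipping string slices instead of an indexed loop, builds the record lists with a running-best accumulator, and replaces A's nested scan over all pairs of record entries by a single forward-pointer sweep over the two monotone record lists (dropping infeasible entries from the reversed suffix-record list once), preserving A's exact tie-breaking.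
import Mathlib
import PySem

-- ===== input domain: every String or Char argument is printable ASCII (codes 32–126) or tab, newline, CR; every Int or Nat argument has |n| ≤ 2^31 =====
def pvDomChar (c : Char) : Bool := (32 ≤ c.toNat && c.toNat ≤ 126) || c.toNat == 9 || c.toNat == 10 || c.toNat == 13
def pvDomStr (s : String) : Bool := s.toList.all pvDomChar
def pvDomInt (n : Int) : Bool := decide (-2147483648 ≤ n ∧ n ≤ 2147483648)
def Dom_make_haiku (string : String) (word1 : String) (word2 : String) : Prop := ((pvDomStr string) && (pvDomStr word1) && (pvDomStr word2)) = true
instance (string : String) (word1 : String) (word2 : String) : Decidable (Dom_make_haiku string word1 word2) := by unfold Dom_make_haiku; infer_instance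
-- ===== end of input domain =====

-- B replaces A's quadratic scan over all (record, record) pairs by a single
-- forward-pointer sweep over the two monotone record lists, and counts matches by
-- zipping slices; same return value, proved equal on all inputs.

-- ===== PORT A =====

-- get_similarity: the option-equality compare is exact here because every call from
-- make_haiku keeps begin+i and i in range (Python never raises in A).
def pvSimA (s : List Char) (b : Int) (w : List Char) : Int :=
  (PySem.List.pyRange 0 (w.length : Int) 1).foldl
    (fun acc i =>
      if PySem.List.pyGet? s (b + i) == PySem.List.pyGet? w i then acc + 1 else acc) 0

-- `if not lst or lst[-1][0] < sim: lst.append((sim, i))`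
def pvRecStepA (sim : Int) (i : Int) (lst : List (Int × Int)) : List (Int × Int) :=
  match lst.getLast? with
  | none => lst ++ [(sim, i)]
  | some e => if e.1 < sim then lst ++ [(sim, i)] else lst

def make_haiku (string : String) (word1 : String) (word2 : String) : String :=
  let s := string.toList
  let w1 := word1.toList
  let w2 := word2.toList
  -- for i in range(len(string)-len(word1)+1): …
  let lst1 := (PySem.List.pyRange 0 ((s.length : Int) - (w1.length : Int) + 1) 1).foldl
      (fun lst i => pvRecStepA (pvSimA s i w1) i lst) []
  -- for i in reversed(range(len(string)-len(word2)+1)): …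
  let lst2 := ((PySem.List.pyRange 0 ((s.length : Int) - (w2.length : Int) + 1) 1).reverse).foldl
      (fun lst i => pvRecStepA (pvSimA s i w2) i lst) []
  -- state = (word1_i, word2_i, max_similarity)
  let fin := lst1.foldl (fun st e1 =>
      lst2.foldl (fun st e2 =>
        if e2.2 - (w1.length : Int) ≥ e1.2 ∧ e2.1 + e1.1 > st.2.2
        then (e1.2, e2.2, e2.1 + e1.1) else st) st)
      ((0 : Int), (0 : Int), (-1 : Int))
  String.ofList (PySem.List.slice s none (some fin.1) ++ w1
      ++ PySem.List.slice s (some (fin.1 + (w1.length : Int))) (some fin.2.1) ++ w2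
      ++ PySem.List.slice s (some (fin.2.1 + (w2.length : Int))) none)

-- ===== PORT B =====

-- sum(1 for a, b in zip(string[i:i+m], word) if a == b)
def pvSimB (s : List Char) (i : Int) (m : Int) (w : List Char) : Int :=
  ((PySem.List.slice s (some i) (some (i + m))).zip w).foldl
    (fun acc p => if p.1 == p.2 then acc + 1 else acc) 0

-- the record loops of Source B: state = (recs, best)
def pvRecStepB (st : List (Int × Int) × Int) (i : Int) (v : Int) : List (Int × Int) × Int :=
  if v > st.2 then (st.1 ++ [(v, i)], v) else st

-- the selection loop of Source B: state = (best_sum, p1, p2); `rem = rem[1:]` while the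
-- head position is below the threshold is List.dropWhile; empty rem breaks.
def pvSelB (m1 : Int) : List (Int × Int) → List (Int × Int) → Int × Int × Int → Int × Int × Int
  | [], _, st => st
  | (sv, p) :: rest, rem, st =>
      let rem' := rem.dropWhile (fun e => decide (e.2 < p + m1))
      match rem' with
      | [] => st
      | (s2, p2) :: _ =>
          pvSelB m1 rest rem' (if sv + s2 > st.1 then (sv + s2, p, p2) else st)

def make_haiku_alt (string : String) (word1 : String) (word2 : String) : String :=
  let s := string.toList
  let w1 := word1.toList
  let w2 := word2.toList
  let m1 : Int := (w1.length : Int)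
  let m2 : Int := (w2.length : Int)
  let s1 := (PySem.List.pyRange 0 ((s.length : Int) - m1 + 1) 1).map (fun i => pvSimB s i m1 w1)
  let s2 := (PySem.List.pyRange 0 ((s.length : Int) - m2 + 1) 1).map (fun i => pvSimB s i m2 w2)
  -- for i, v in enumerate(s1): …
  let recs1 := ((PySem.List.enumerate s1 0).foldl (fun st p => pvRecStepB st p.1 p.2) ([], -1)).1
  -- for i in range(len(s2)-1, -1, -1): …  (s2[i] is in range throughout)
  let recs2 := ((PySem.List.pyRange ((s2.length : Int) - 1) (-1) (-1)).foldl
      (fun st i => pvRecStepB st i (PySem.List.pyGetD s2 i 0)) ([], -1)).1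
  -- rem = recs2[::-1] (reverse, by PySem.List.slice?_none_none_neg_one)
  let fin := pvSelB m1 recs1 recs2.reverse ((-1 : Int), (0 : Int), (0 : Int))
  String.ofList (PySem.List.slice s none (some fin.2.1) ++ w1
      ++ PySem.List.slice s (some (fin.2.1 + m1)) (some fin.2.2) ++ w2
      ++ PySem.List.slice s (some (fin.2.2 + m2)) none)

-- ===== PRECONDITION & SPEC =====
def Spec_make_haiku (string : String) (word1 : String) (word2 : String) (out : String) : Prop := out = make_haiku_alt string word1 word2
instance (string : String) (word1 : String) (word2 : String) (out : String) : Decidable (Spec_make_haiku string word1 word2 out) := by unfold Spec_make_haiku; infer_instance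

-- ===== CLAIM (what is proved, stated in full; the proofs are below) =====
def Claim_equal_make_haiku : Prop := ∀ (string : String) (word1 : String) (word2 : String), Dom_make_haiku string word1 word2 → Spec_make_haiku string word1 word2 (make_haiku string word1 word2)

-- ===== LEMMAS AND PROOFS =====

lemma pv_zip_slice_eq (s w : List Char) (j : Nat) (h : j + w.length ≤ s.length) :
    ((s.drop j).take w.length).zip w
      = (List.range w.length).map (fun k => (s.getD (j+k) default, w.getD k default)) := by
  apply List.ext_getElem
  · simp; omega
  · intro k h1 h2
    have hk : k < w.length := by simp at h2; omega
    have hs : j + k < s.length := by omega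
    simp [List.getElem_zip, List.getElem_take, List.getElem_drop, List.getD, hk, hs]

lemma pv_sim_eq (s w : List Char) (i : Int) (h0 : 0 ≤ i) (h1 : i + (w.length : Int) ≤ (s.length : Int)) :
    pvSimA s i w = pvSimB s i (w.length : Int) w := by
  obtain ⟨j, rfl⟩ : ∃ j : Nat, i = (j : Int) := ⟨i.toNat, by omega⟩
  have hlen : j + w.length ≤ s.length := by exact_mod_cast h1
  unfold pvSimA pvSimB
  rw [PySem.List.slice_natCast_add, pv_zip_slice_eq s w j hlen,
    PySem.List.pyRange_zero_natCast, List.foldl_map, List.foldl_map]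
  refine PySem.List.foldl_congr_mem _ _ _ _ (fun acc k hk => ?_)
  have hk' : k < w.length := List.mem_range.mp hk
  have hs : j + k < s.length := by omega
  have e1 : PySem.List.pyGet? s ((j : Int) + (k : Int)) = some (s.getD (j + k) default) := by
    have : (j : Int) + (k : Int) = ((j + k : Nat) : Int) := by push_cast; ring
    rw [this, PySem.List.pyGet?_natCast, List.getElem?_eq_getElem hs]
    simp [List.getD, List.getElem?_eq_getElem hs]
  have e2 : PySem.List.pyGet? w ((k : Nat) : Int) = some (w.getD k default) := by
    rw [PySem.List.pyGet?_natCast, List.getElem?_eq_getElem hk']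
    simp [List.getD, List.getElem?_eq_getElem hk']
  simp [e1, e2]

lemma pv_countfold_nonneg (l : List (Char × Char)) :
    ∀ acc : Int, 0 ≤ acc → 0 ≤ l.foldl (fun acc p => if p.1 == p.2 then acc + 1 else acc) acc := by
  induction l with
  | nil => intro acc h; simpa
  | cons x t ih => intro acc h; simp only [List.foldl_cons]; split <;> [exact ih _ (by omega); exact ih _ h]

lemma pv_simB_nonneg (s : List Char) (i m : Int) (w : List Char) : 0 ≤ pvSimB s i m w :=
  pv_countfold_nonneg _ 0 le_rfl

lemma pv_enumerate_map_pyRange (f : Int → Int) :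
    ∀ (n : Nat) (a : Int), PySem.List.enumerate ((PySem.List.pyRange a (a + (n : Int)) 1).map f) a
      = (PySem.List.pyRange a (a + (n : Int)) 1).map (fun i => (i, f i)) := by
  intro n
  induction n with
  | zero => intro a; simp [PySem.List.enumerate_nil]
  | succ k ih =>
    intro a
    rw [PySem.List.pyRange_one_cons (by push_cast; omega : a < a + ((k+1 : Nat) : Int))]
    have h : a + 1 + (k : Int) = a + ((k+1 : Nat) : Int) := by push_cast; ring
    simp only [List.map_cons, PySem.List.enumerate_cons]
    rw [← h, ih (a+1)]

def pvLastSim (lst : List (Int × Int)) : Int := ((lst.getLast?).map Prod.fst).getD (-1)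

lemma pv_rec_fold_eq (v : Int → Int) :
    ∀ (L : List Int) (lst : List (Int × Int)), (∀ i ∈ L, 0 ≤ v i) →
      L.foldl (fun st i => pvRecStepB st i (v i)) (lst, pvLastSim lst)
        = (L.foldl (fun l i => pvRecStepA (v i) i l) lst,
           pvLastSim (L.foldl (fun l i => pvRecStepA (v i) i l) lst)) := by
  intro L
  induction L with
  | nil => intro lst _; simp
  | cons i t ih =>
    intro lst hv
    simp only [List.foldl_cons]
    have hstep : pvRecStepB (lst, pvLastSim lst) i (v i)
        = (pvRecStepA (v i) i lst, pvLastSim (pvRecStepA (v i) i lst)) := by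
      cases h : lst.getLast? with
      | none =>
        have hnil : lst = [] := List.getLast?_eq_none_iff.mp h
        subst hnil
        have hvi : (0:Int) ≤ v i := hv i (by simp)
        simp [pvRecStepB, pvRecStepA, pvLastSim, show v i > (-1:Int) by omega]
      | some e =>
        by_cases hc : e.1 < v i
        · simp [pvRecStepB, pvRecStepA, pvLastSim, h, List.getLast?_append,
            show v i > e.1 from hc]
        · simp [pvRecStepB, pvRecStepA, pvLastSim, h, hc]
    rw [hstep, ih _ (fun j hj => hv j (by simp [hj]))]

lemma pv_pairwise_last_max {α : Type} (R : α → α → Prop) (l : List α) (hp : l.Pairwise R)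
    (hl : l ≠ []) (e : α) (he : e ∈ l) : e = l.getLast hl ∨ R e (l.getLast hl) := by
  have hsplit := List.dropLast_append_getLast hl
  rw [← hsplit] at hp he
  rw [List.pairwise_append] at hp
  rcases List.mem_append.mp he with h | h
  · exact Or.inr (hp.2.2 e h _ (by simp))
  · simp at h; exact Or.inl h

lemma pv_rec_fold_props (v : Int → Int) (r : Int → Int → Prop) :
    ∀ (L : List Int) (lst : List (Int × Int)),
      L.Pairwise r →
      (∀ i ∈ L, ∀ e ∈ lst, r e.2 i) →
      lst.Pairwise (fun a b : Int × Int => a.1 < b.1 ∧ r a.2 b.2) →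
      (L.foldl (fun l i => pvRecStepA (v i) i l) lst).Pairwise
          (fun a b : Int × Int => a.1 < b.1 ∧ r a.2 b.2)
      ∧ ∀ e ∈ L.foldl (fun l i => pvRecStepA (v i) i l) lst, e ∈ lst ∨ e.2 ∈ L := by
  intro L
  induction L with
  | nil => intro lst _ _ hp; exact ⟨hp, fun e he => Or.inl he⟩
  | cons i t ih =>
    intro lst hL hlink hp
    simp only [List.foldl_cons]
    have hLt : t.Pairwise r := hL.tail
    have hrel : ∀ j ∈ t, r i j := fun j hj => (List.pairwise_cons.mp hL).1 j hj
    -- the new accumulator after one step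
    have hprops : (pvRecStepA (v i) i lst).Pairwise (fun a b : Int × Int => a.1 < b.1 ∧ r a.2 b.2)
        ∧ ∀ e ∈ pvRecStepA (v i) i lst, e ∈ lst ∨ e.2 = i := by
      unfold pvRecStepA
      cases h : lst.getLast? with
      | none =>
        have : lst = [] := List.getLast?_eq_none_iff.mp h
        subst this; simp
      | some g =>
        have hne : lst ≠ [] := by intro hnil; subst hnil; simp at h
        by_cases hc : g.1 < v i
        · simp only [hc, if_pos]
          constructor
          · rw [List.pairwise_append]
            refine ⟨hp, by simp, fun a ha b hb => ?_⟩
            simp at hb; subst hb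
            have hg : g = lst.getLast hne := by
              have := List.getLast?_eq_some_getLast (l := lst) hne; rw [h] at this; exact Option.some_inj.mp this
            rcases pv_pairwise_last_max _ lst hp hne a ha with h1 | h1
            · refine ⟨?_, hlink i (by simp) a ha⟩
              show a.1 < v i
              rw [h1, ← hg]; exact hc
            · refine ⟨?_, hlink i (by simp) a ha⟩
              show a.1 < v i
              exact lt_trans (by rw [← hg] at h1; exact h1.1) hc
          · intro e he; rcases List.mem_append.mp he with h1 | h1
            · exact Or.inl h1
            · simp at h1; subst h1; simp
        · simp only [hc, if_neg, not_false_iff]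
          exact ⟨hp, fun e he => Or.inl he⟩
    have hlink' : ∀ j ∈ t, ∀ e ∈ pvRecStepA (v i) i lst, r e.2 j := by
      intro j hj e he
      rcases hprops.2 e he with h1 | h1
      · exact hlink j (by simp [hj]) e h1
      · rw [h1]; exact hrel j hj
    obtain ⟨hA, hB⟩ := ih (pvRecStepA (v i) i lst) hLt hlink' hprops.1
    refine ⟨hA, fun e he => ?_⟩
    rcases hB e he with h1 | h1
    · rcases hprops.2 e h1 with h2 | h2
      · exact Or.inl h2
      · exact Or.inr (by simp [h2])
    · exact Or.inr (by simp [h1])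

def pvStepPick (m1 : Int) (l2 : List (Int × Int)) (st : Int × Int × Int) (e1 : Int × Int) : Int × Int × Int :=
  match (l2.takeWhile (fun e => decide (e1.2 + m1 ≤ e.2))).getLast? with
  | none => st
  | some g => if g.1 + e1.1 > st.2.2 then (e1.2, g.2, g.1 + e1.1) else st

lemma pv_dropWhile_head_false {α : Type} (p : α → Bool) :
    ∀ (l : List α) (d : α) (ds : List α), l.dropWhile p = d :: ds → p d = false := by
  intro l
  induction l with
  | nil => intro d ds h; simp [List.dropWhile] at h
  | cons a t ih =>
    intro d ds h
    by_cases ha : p a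
    · rw [List.dropWhile_cons_of_pos ha] at h; exact ih d ds h
    · rw [List.dropWhile_cons_of_neg ha] at h
      cases h; simpa using ha

lemma pv_fold_no_update (m1 : Int) (e1 : Int × Int) :
    ∀ (D : List (Int × Int)) (st : Int × Int × Int), (∀ e ∈ D, ¬ (e.2 - m1 ≥ e1.2)) →
      D.foldl (fun st e2 =>
        if e2.2 - m1 ≥ e1.2 ∧ e2.1 + e1.1 > st.2.2 then (e1.2, e2.2, e2.1 + e1.1) else st) st = st := by
  intro D
  induction D with
  | nil => intro st _; simp
  | cons d t ih =>
    intro st h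
    simp only [List.foldl_cons]
    rw [if_neg (by intro hc; exact h d (by simp) hc.1)]
    exact ih st (fun e he => h e (by simp [he]))

lemma pv_fold_increasing (m1 : Int) (e1 : Int × Int) :
    ∀ (T : List (Int × Int)) (st : Int × Int × Int),
      T.Pairwise (fun a b : Int × Int => a.1 < b.1) →
      (∀ e ∈ T, e.2 - m1 ≥ e1.2) →
      T.foldl (fun st e2 =>
        if e2.2 - m1 ≥ e1.2 ∧ e2.1 + e1.1 > st.2.2 then (e1.2, e2.2, e2.1 + e1.1) else st) st
      = match T.getLast? with
        | none => st
        | some g => if g.1 + e1.1 > st.2.2 then (e1.2, g.2, g.1 + e1.1) else st := by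
  intro T
  induction T with
  | nil => intro st _ _; simp
  | cons a t ih =>
    intro st hp hf
    simp only [List.foldl_cons]
    have hfa : a.2 - m1 ≥ e1.2 := hf a (by simp)
    cases t with
    | nil =>
      simp only [List.foldl_nil, List.getLast?_singleton]
      by_cases hc : a.1 + e1.1 > st.2.2
      · rw [if_pos ⟨hfa, hc⟩, if_pos hc]
      · rw [if_neg (by intro h; exact hc h.2), if_neg hc]
    | cons b u =>
      have hne : (b :: u : List (Int × Int)) ≠ [] := by simp
      have hlast : (a :: b :: u).getLast? = (b :: u).getLast? := by
        rw [List.getLast?_cons_cons]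
      rw [hlast]
      have hg : (b :: u).getLast? = some ((b :: u).getLast hne) := List.getLast?_eq_some_getLast hne
      have hga : a.1 < ((b :: u).getLast hne).1 :=
        (List.pairwise_cons.mp hp).1 _ (List.getLast_mem hne)
      rw [ih _ hp.tail (fun e he => hf e (by simp [he])), hg]
      dsimp only
      set g := (b :: u).getLast hne with hgdef
      by_cases hca : a.2 - m1 ≥ e1.2 ∧ a.1 + e1.1 > st.2.2
      · obtain ⟨hf1, hf2⟩ := hca
        rw [if_pos (show a.2 - m1 ≥ e1.2 ∧ a.1 + e1.1 > st.2.2 from ⟨hf1, hf2⟩)]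
        rw [if_pos (show g.1 + e1.1 > (e1.2, a.2, a.1 + e1.1).2.2 by dsimp only; omega)]
        rw [if_pos (show g.1 + e1.1 > st.2.2 by omega)]
      · rw [if_neg hca]

lemma pv_innerA_char (m1 : Int) (e1 : Int × Int) (l2 : List (Int × Int))
    (h2pos : l2.Pairwise (fun a b : Int × Int => b.2 < a.2))
    (h2sim : l2.Pairwise (fun a b : Int × Int => a.1 < b.1)) (st : Int × Int × Int) :
    l2.foldl (fun st e2 =>
        if e2.2 - m1 ≥ e1.2 ∧ e2.1 + e1.1 > st.2.2 then (e1.2, e2.2, e2.1 + e1.1) else st) st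
      = pvStepPick m1 l2 st e1 := by
  set q : Int × Int → Bool := fun e => decide (e1.2 + m1 ≤ e.2) with hq
  have hsplit : l2.takeWhile q ++ l2.dropWhile q = l2 := List.takeWhile_append_dropWhile
  conv_lhs => rw [← hsplit]
  rw [List.foldl_append]
  have hD : ∀ e ∈ l2.dropWhile q, ¬ (e.2 - m1 ≥ e1.2) := by
    cases hd : l2.dropWhile q with
    | nil => simp
    | cons d ds =>
      intro e he
      have hdq : q d = false := pv_dropWhile_head_false q l2 d ds hd
      have hdlt : d.2 < e1.2 + m1 := by simpa [hq] using hdq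
      have hsub : (l2.dropWhile q).Pairwise (fun a b : Int × Int => b.2 < a.2) :=
        h2pos.sublist (List.dropWhile_sublist q)
      rw [hd] at hsub
      rcases List.mem_cons.mp he with rfl | he2
      · omega
      · have := (List.pairwise_cons.mp hsub).1 e he2; omega
  rw [pv_fold_no_update m1 e1 _ _ hD]
  have hT : ∀ e ∈ l2.takeWhile q, e.2 - m1 ≥ e1.2 := by
    intro e he
    have := List.mem_takeWhile_imp he
    simp [hq] at this; omega
  rw [pv_fold_increasing m1 e1 _ _ (h2sim.sublist (List.takeWhile_sublist q)) hT]
  rfl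

lemma pv_rev_dropWhile (c : Int) :
    ∀ (l : List (Int × Int)), l.Pairwise (fun a b : Int × Int => b.2 < a.2) →
      (l.reverse).dropWhile (fun e => decide (e.2 < c))
        = (l.takeWhile (fun e => decide (c ≤ e.2))).reverse := by
  intro l
  induction l with
  | nil => simp
  | cons a t ih =>
    intro hp
    rw [List.reverse_cons, List.dropWhile_append, ih hp.tail]
    by_cases ha : c ≤ a.2
    · rw [List.takeWhile_cons_of_pos (by simpa using ha), List.reverse_cons]
      by_cases hemp : (t.takeWhile (fun e => decide (c ≤ e.2))).reverse = []
      · rw [if_pos (by rw [List.isEmpty_iff]; exact hemp), List.dropWhile_cons_of_neg (by simp; omega), hemp]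
        simp
      · rw [if_neg (by rw [List.isEmpty_iff]; exact hemp)]
    · have ha : a.2 < c := by omega
      have htw : t.takeWhile (fun e => decide (c ≤ e.2)) = [] := by
        cases t with
        | nil => rfl
        | cons b u =>
          rw [List.takeWhile_cons_of_neg]
          have := (List.pairwise_cons.mp hp).1 b (by simp)
          simp; omega
      rw [List.takeWhile_cons_of_neg (by simp; omega), htw]
      rw [if_pos (by simp)]
      rw [List.dropWhile_cons_of_pos (by simp; omega)]
      simp

lemma pv_tw_mono (l2 : List (Int × Int)) (c c' : Int) (hcc : c ≤ c')
    (h : l2.takeWhile (fun e => decide (c ≤ e.2)) = []) :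
    l2.takeWhile (fun e => decide (c' ≤ e.2)) = [] := by
  cases l2 with
  | nil => simp
  | cons a t =>
    rw [List.takeWhile_cons] at h ⊢
    by_cases ha : c ≤ a.2
    · simp [ha] at h
    · have : ¬ c' ≤ a.2 := by omega
      simp [this]

lemma pv_take_take (l2 : List (Int × Int)) (c0 c : Int) (hcc : c0 ≤ c) :
    (l2.takeWhile (fun e => decide (c0 ≤ e.2))).takeWhile (fun e => decide (c ≤ e.2))
      = l2.takeWhile (fun e => decide (c ≤ e.2)) := by
  rw [List.takeWhile_takeWhile]
  congr 1
  funext e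
  by_cases h : c ≤ e.2
  · simp [h]; omega
  · simp [h]

lemma pv_fold_pick_nil (m1 : Int) (l2 : List (Int × Int)) :
    ∀ (rest : List (Int × Int)) (st : Int × Int × Int),
      (∀ e1 ∈ rest, l2.takeWhile (fun e => decide (e1.2 + m1 ≤ e.2)) = []) →
      rest.foldl (pvStepPick m1 l2) st = st := by
  intro rest
  induction rest with
  | nil => intro st _; simp
  | cons e1 t ih =>
    intro st h
    simp only [List.foldl_cons]
    have : pvStepPick m1 l2 st e1 = st := by
      unfold pvStepPick
      rw [h e1 (by simp)]
      rfl
    rw [this]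
    exact ih st (fun e he => h e (by simp [he]))

lemma pv_sel_eq (m1 : Int) (l2 : List (Int × Int))
    (h2pos : l2.Pairwise (fun a b : Int × Int => b.2 < a.2)) :
    ∀ (l1 : List (Int × Int)) (c0 : Int) (st : Int × Int × Int),
      l1.Pairwise (fun a b : Int × Int => a.2 < b.2) →
      (∀ e ∈ l1, c0 ≤ e.2 + m1) →
      pvSelB m1 l1 ((l2.takeWhile (fun e => decide (c0 ≤ e.2))).reverse) (st.2.2, st.1, st.2.1)
        = ((l1.foldl (pvStepPick m1 l2) st).2.2, (l1.foldl (pvStepPick m1 l2) st).1,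
           (l1.foldl (pvStepPick m1 l2) st).2.1) := by
  intro l1
  induction l1 with
  | nil => intro c0 st _ _; simp [pvSelB]
  | cons e1 rest ih =>
    intro c0 st hp hc0
    obtain ⟨sv, p⟩ := e1
    show pvSelB m1 ((sv, p) :: rest) _ _ = _
    unfold pvSelB
    have hdw : ((l2.takeWhile (fun e => decide (c0 ≤ e.2))).reverse).dropWhile
        (fun e => decide (e.2 < p + m1))
        = (l2.takeWhile (fun e => decide (p + m1 ≤ e.2))).reverse := by
      have h1 := pv_rev_dropWhile (p + m1) (l2.takeWhile (fun e => decide (c0 ≤ e.2)))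
        (h2pos.sublist (List.takeWhile_sublist _))
      rw [h1, pv_take_take l2 c0 (p + m1) (hc0 (sv, p) (by simp))]
    rw [hdw]
    cases htw : l2.takeWhile (fun e => decide (p + m1 ≤ e.2)) with
    | nil =>
      simp only [List.reverse_nil]
      have hrest : rest.foldl (pvStepPick m1 l2) (pvStepPick m1 l2 st (sv, p))
          = pvStepPick m1 l2 st (sv, p) := by
        refine pv_fold_pick_nil m1 l2 rest _ (fun e he => ?_)
        refine pv_tw_mono l2 (p + m1) (e.2 + m1) ?_ htw
        have := (List.pairwise_cons.mp hp).1 e he; omega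
      have hstep : pvStepPick m1 l2 st (sv, p) = st := by
        unfold pvStepPick; rw [htw]; rfl
      simp only [List.foldl_cons]
      rw [hrest, hstep]
    | cons g0 gs =>
      have hne : (g0 :: gs : List (Int × Int)) ≠ [] := by simp
      have hg : ((g0 :: gs).reverse).head? = some ((g0 :: gs).getLast hne) := by
        rw [List.head?_reverse]; exact List.getLast?_eq_some_getLast hne
      cases hrev : (g0 :: gs).reverse with
      | nil => simp at hrev
      | cons gg rr =>
        rw [hrev] at hg
        simp only [List.head?_cons, Option.some_inj] at hg
        obtain ⟨s2, p2⟩ := gg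
        have hstep : pvStepPick m1 l2 st (sv, p)
            = if sv + s2 > st.2.2 then (p, p2, sv + s2) else st := by
          unfold pvStepPick
          rw [htw, List.getLast?_eq_some_getLast hne, ← hg]
          dsimp only
          by_cases hcmp : s2 + sv > st.2.2
          · rw [if_pos hcmp, if_pos (by omega)]
            simp [add_comm]
          · rw [if_neg hcmp, if_neg (by omega)]
        simp only [List.foldl_cons]
        have hrec := ih (p + m1) (pvStepPick m1 l2 st (sv, p)) hp.tail
          (fun e he => by have := (List.pairwise_cons.mp hp).1 e he; omega)
        rw [htw, hrev] at hrec
        have hst' : (if sv + s2 > (st.2.2, st.1, st.2.1).1 then (sv + s2, p, p2)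
              else (st.2.2, st.1, st.2.1))
            = ((pvStepPick m1 l2 st (sv, p)).2.2, (pvStepPick m1 l2 st (sv, p)).1,
               (pvStepPick m1 l2 st (sv, p)).2.1) := by
          rw [hstep]
          by_cases hcmp : sv + s2 > st.2.2
          · rw [if_pos (show sv + s2 > (st.2.2, st.1, st.2.1).1 from hcmp), if_pos hcmp]
          · rw [if_neg (show ¬ sv + s2 > (st.2.2, st.1, st.2.1).1 from hcmp), if_neg hcmp]
        rw [hst']
        exact hrec

lemma pv_enum_range (f : Int → Int) (K : Int) :
    PySem.List.enumerate ((PySem.List.pyRange 0 K 1).map f) 0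
      = (PySem.List.pyRange 0 K 1).map (fun i => (i, f i)) := by
  rcases (by omega : K ≤ 0 ∨ 0 < K) with h | h
  · rw [PySem.List.pyRange_one_eq_nil h]; simp [PySem.List.enumerate_nil]
  · have hK : K = 0 + ((K.toNat : Nat) : Int) := by omega
    rw [hK]; exact pv_enumerate_map_pyRange f K.toNat 0

lemma pv_range_len (f : Int → Int) (K : Int) :
    PySem.List.pyRange 0 ((((PySem.List.pyRange 0 K 1).map f).length : Int)) 1
      = PySem.List.pyRange 0 K 1 := by
  rw [List.length_map, PySem.List.length_pyRange_one]
  rcases (by omega : K ≤ 0 ∨ 0 < K) with h | h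
  · rw [PySem.List.pyRange_one_eq_nil (by omega), PySem.List.pyRange_one_eq_nil h]
  · congr 1; omega

theorem pv_main (string word1 word2 : String) :
    make_haiku string word1 word2 = make_haiku_alt string word1 word2 := by
  unfold make_haiku make_haiku_alt
  dsimp only
  set s := string.toList with hs
  set w1 := word1.toList with hw1
  set w2 := word2.toList with hw2
  set K1 : Int := (s.length : Int) - (w1.length : Int) + 1 with hK1
  set K2 : Int := (s.length : Int) - (w2.length : Int) + 1 with hK2
  set m1 : Int := (w1.length : Int) with hm1
  set m2 : Int := (w2.length : Int) with hm2
  set v1 : Int → Int := fun i => pvSimB s i m1 w1 with hv1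
  set v2 : Int → Int := fun i => pvSimB s i m2 w2 with hv2
  set lst1 := (PySem.List.pyRange 0 K1 1).foldl (fun l i => pvRecStepA (v1 i) i l) [] with hlst1
  set lst2 := ((PySem.List.pyRange 0 K2 1).reverse).foldl (fun l i => pvRecStepA (v2 i) i l) []
    with hlst2
  -- A's record lists, rewritten with B's similarity values
  have hA1 : (PySem.List.pyRange 0 K1 1).foldl (fun l i => pvRecStepA (pvSimA s i w1) i l) []
      = lst1 := by
    refine PySem.List.foldl_congr_mem _ _ _ _ (fun l i hi => ?_)
    obtain ⟨h0, h1⟩ := PySem.List.mem_pyRange_one.mp hi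
    rw [pv_sim_eq s w1 i h0 (by omega)]
  have hA2 : ((PySem.List.pyRange 0 K2 1).reverse).foldl
        (fun l i => pvRecStepA (pvSimA s i w2) i l) [] = lst2 := by
    refine PySem.List.foldl_congr_mem _ _ _ _ (fun l i hi => ?_)
    obtain ⟨h0, h1⟩ := PySem.List.mem_pyRange_one.mp (List.mem_reverse.mp hi)
    rw [pv_sim_eq s w2 i h0 (by omega)]
  -- B's record lists equal the same two lists
  have hB1 : ((PySem.List.enumerate ((PySem.List.pyRange 0 K1 1).map v1) 0).foldl
        (fun st p => pvRecStepB st p.1 p.2) ([], -1)).1 = lst1 := by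
    rw [pv_enum_range v1 K1, List.foldl_map]
    have := pv_rec_fold_eq v1 (PySem.List.pyRange 0 K1 1) []
      (fun i _ => pv_simB_nonneg s i m1 w1)
    simp only [pvLastSim, List.getLast?_nil, Option.map_none, Option.getD_none] at this
    rw [this]
  have hB2 : ((PySem.List.pyRange ((((PySem.List.pyRange 0 K2 1).map v2).length : Int) - 1) (-1)
        (-1)).foldl
        (fun st i => pvRecStepB st i (PySem.List.pyGetD ((PySem.List.pyRange 0 K2 1).map v2) i 0))
        ([], -1)).1 = lst2 := by
    rw [PySem.List.pyRange_neg_one_eq_reverse,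
      show (((PySem.List.pyRange 0 K2 1).map v2).length : Int) - 1 + 1
        = (((PySem.List.pyRange 0 K2 1).map v2).length : Int) by ring,
      show (-1 : Int) + 1 = 0 by ring, pv_range_len v2 K2]
    have hcong : ((PySem.List.pyRange 0 K2 1).reverse).foldl
          (fun st i => pvRecStepB st i (PySem.List.pyGetD ((PySem.List.pyRange 0 K2 1).map v2) i 0))
          ([], -1)
        = ((PySem.List.pyRange 0 K2 1).reverse).foldl (fun st i => pvRecStepB st i (v2 i)) ([], -1) := by
      refine PySem.List.foldl_congr_mem _ _ _ _ (fun st i hi => ?_)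
      obtain ⟨h0, h1⟩ := PySem.List.mem_pyRange_one.mp (List.mem_reverse.mp hi)
      rw [PySem.List.pyGetD_map_pyRange_of_nonneg v2 K2 i 0 h0 h1]
    rw [hcong]
    have := pv_rec_fold_eq v2 ((PySem.List.pyRange 0 K2 1).reverse) []
      (fun i _ => pv_simB_nonneg s i m2 w2)
    simp only [pvLastSim, List.getLast?_nil, Option.map_none, Option.getD_none] at this
    rw [this]
  -- structural properties of the two record lists
  have hprops1 := pv_rec_fold_props v1 (fun i j => i < j) (PySem.List.pyRange 0 K1 1) []
    (PySem.List.pairwise_lt_pyRange_one 0 K1) (by simp) (by simp)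
  have hprops2 := pv_rec_fold_props v2 (fun i j => j < i) ((PySem.List.pyRange 0 K2 1).reverse) []
    (List.pairwise_reverse.mpr (by exact PySem.List.pairwise_lt_pyRange_one 0 K2)) (by simp) (by simp)
  rw [← hlst1] at hprops1
  rw [← hlst2] at hprops2
  have h2pos : lst2.Pairwise (fun a b : Int × Int => b.2 < a.2) :=
    hprops2.1.imp (fun h => h.2)
  have h2sim : lst2.Pairwise (fun a b : Int × Int => a.1 < b.1) :=
    hprops2.1.imp (fun h => h.1)
  have h1pos : lst1.Pairwise (fun a b : Int × Int => a.2 < b.2) :=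
    hprops1.1.imp (fun h => h.2)
  have h2nonneg : ∀ e ∈ lst2, (0 : Int) ≤ e.2 := by
    intro e he
    rcases hprops2.2 e he with h | h
    · simp at h
    · exact (PySem.List.mem_pyRange_one.mp (List.mem_reverse.mp h)).1
  have h1c0 : ∀ e ∈ lst1, (0 : Int) ≤ e.2 + m1 := by
    intro e he
    rcases hprops1.2 e he with h | h
    · simp at h
    · have := (PySem.List.mem_pyRange_one.mp h).1
      have : (0:Int) ≤ m1 := by rw [hm1]; positivity
      omega
  -- A's pair scan = fold of the pick step
  have hinner : (fun (st : Int × Int × Int) (e1 : Int × Int) =>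
        lst2.foldl (fun st e2 =>
          if e2.2 - m1 ≥ e1.2 ∧ e2.1 + e1.1 > st.2.2 then (e1.2, e2.2, e2.1 + e1.1) else st) st)
      = pvStepPick m1 lst2 :=
    funext fun st => funext fun e1 => pv_innerA_char m1 e1 lst2 h2pos h2sim st
  -- B's sweep = the same fold, components permuted
  have htwself : lst2.takeWhile (fun e => decide ((0:Int) ≤ e.2)) = lst2 :=
    List.takeWhile_eq_self_iff.mpr (fun e he => by simpa using h2nonneg e he)
  have hsel := pv_sel_eq m1 lst2 h2pos lst1 0 ((0 : Int), (0 : Int), (-1 : Int)) h1pos h1c0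
  rw [htwself] at hsel
  -- assemble
  simp only [hA1, hA2, hinner]
  rw [hB1, hB2]
  dsimp only at hsel
  rw [hsel]

-- ===== VERDICT (by name: the statement is the Claim_ definition above) =====
theorem make_haiku_spec : Claim_equal_make_haiku := by
  intro string word1 word2 _
  exact pv_main string word1 word2
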